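-- pv_equiv track=rewrite | github.com/qiskit-community/qiskit-dynamics | qiskit_dynamics/perturbation/dyson_magnus.py | _get_complete_dyson_like_indices
-- ===== SOURCE A (Python) =====
-- from typing import Optional, List, Callable, Tuple, Union
--
-- def _get_complete_dyson_like_indices(dyson_terms: List[List[int]]) -> List[List[int]]:
--     """Given a list of Dyson terms to compute specified as lists of indices,
--     recursively construct all other Dyson terms that need to be computed,
--     returned as a list, ordered by increasing Dyson order, and
--     in lexicographic order within an order.
--
--     Args:
--         dyson_terms: Terms to compute.
--
--     Returns:
--         list: List of all terms that need to be computed.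
--     """
--
--     max_order = max(map(len, dyson_terms))
--     term_dict = {k: [] for k in range(1, max_order + 1)}
--
--     # first populate with requested terms
--     for term in dyson_terms:
--         order = len(term)
--         if term not in term_dict[order]:
--             term_dict[order].append(list(term))
--
--     # loop through orders in reverse order
--     for order in range(max_order, 1, -1):
--         for term in term_dict[order]:
--             term = list(term)
--             if term[1:] not in term_dict[order - 1]:
--                 term_dict[order - 1].append(term[1:])
--
--     ordered_term_list = []
--
--     for order in range(1, max(term_dict.keys()) + 1):
--         ordered_term_list += term_dict[order]
--
--     # sort in terms of increasing length and lexicographic order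
--     ordered_term_list.sort(key=str)
--     ordered_term_list.sort(key=len)
--
--     return ordered_term_list
-- ===== SOURCE B (Python) =====
-- def _get_complete_dyson_like_indices(dyson_terms):
--     """Direct enumeration: every suffix of every requested term, collected in a
--     set, then sorted by increasing length and lexicographic string order."""
--     suffixes = {tuple(term)[i:] for term in dyson_terms for i in range(len(term))}
--     ordered_term_list = [list(t) for t in suffixes]
--     ordered_term_list.sort(key=str)
--     ordered_term_list.sort(key=len)
--     return ordered_term_list
-- ===== Notes on version B (the rewrite author's own statement) =====
-- stated objective: simpler
-- what changed: B replaces A's order-indexed dict with reverse order-by-order propagation of single suffixes by one set comprehension that directly enumerates every suffix of every requested term, then applies the same two stable sorts (key=str, then key=len).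
-- crash fix: On an empty input list A raises ValueError (max() of an empty sequence) and on an input containing an empty term A raises KeyError (term_dict[0]); B returns the sorted suffix set of the remaining terms (e.g. [] for input []). — e.g. on _get_complete_dyson_like_indices([]): A raises ValueError, B returns []
import Mathlib
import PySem

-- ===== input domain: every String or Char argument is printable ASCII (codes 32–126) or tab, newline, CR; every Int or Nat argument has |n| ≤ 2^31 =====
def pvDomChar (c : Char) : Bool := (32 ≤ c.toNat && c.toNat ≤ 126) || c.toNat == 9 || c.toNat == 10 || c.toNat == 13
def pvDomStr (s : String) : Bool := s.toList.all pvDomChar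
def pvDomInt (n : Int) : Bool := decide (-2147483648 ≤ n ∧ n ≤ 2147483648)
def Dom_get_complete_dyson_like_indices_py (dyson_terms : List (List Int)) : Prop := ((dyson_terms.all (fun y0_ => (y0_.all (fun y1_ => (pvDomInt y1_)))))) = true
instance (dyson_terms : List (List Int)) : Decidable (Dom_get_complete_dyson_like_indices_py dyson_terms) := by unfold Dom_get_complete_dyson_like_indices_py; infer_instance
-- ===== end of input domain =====

-- B replaces A's reverse order-by-order dict propagation of single suffixes by direct
-- enumeration of every suffix of every requested term into a set, then the same two
-- stable sorts (key=str, then key=len); objective: simpler.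

-- shared sort key: Python's str() of a list of ints, e.g. "[1, 2]" (hand port, exact for int lists)
def pyReprChars : List Int → List Char
  | [] => []
  | [a] => PySem.Int.toChars a
  | a :: b :: t => PySem.Int.toChars a ++ ',' :: ' ' :: pyReprChars (b :: t)

def pyStrList (t : List Int) : String := String.ofList ('[' :: pyReprChars t ++ [']'])

-- ===== PORT A =====
def aMaxOrder (dyson_terms : List (List Int)) : Int :=
  (PySem.List.max? (dyson_terms.map (fun t => PySem.List.len t)) (fun x => x)).getD 0

def aInit (max_order : Int) : PySem.Dict Int (List (List Int)) :=
  (PySem.List.pyRange 1 (max_order + 1) 1).foldl (fun d k => d.insert k []) PySem.Dict.empty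

def aLoop1 (dyson_terms : List (List Int)) (d : PySem.Dict Int (List (List Int))) : PySem.Dict Int (List (List Int)) :=
  dyson_terms.foldl (fun d term =>
      let order := PySem.List.len term
      let cur := d.getD order []          -- KeyError for an empty term is excluded by Pre_
      if term ∈ cur then d else d.insert order (cur ++ [term])) d

def aStep (order : Int) (d : PySem.Dict Int (List (List Int))) (term : List Int) : PySem.Dict Int (List (List Int)) :=
  let cur := d.getD (order - 1) []
  if PySem.List.slice term (some 1) none ∈ cur then d
  else d.insert (order - 1) (cur ++ [PySem.List.slice term (some 1) none])

def aLoop2 (max_order : Int) (d : PySem.Dict Int (List (List Int))) : PySem.Dict Int (List (List Int)) :=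
  (PySem.List.pyRange max_order 1 (-1)).foldl (fun d order =>
      (d.getD order []).foldl (aStep order) d) d

def aOrdered (d : PySem.Dict Int (List (List Int))) : List (List Int) :=
  let mx : Int := (PySem.List.max? d.keys (fun x => x)).getD 0
  (PySem.List.pyRange 1 (mx + 1) 1).foldl (fun acc order => acc ++ d.getD order []) []

def get_complete_dyson_like_indices_py (dyson_terms : List (List Int)) : List (List Int) :=
  let max_order := aMaxOrder dyson_terms
  let term_dict := aInit max_order
  let term_dict := aLoop1 dyson_terms term_dict
  let term_dict := aLoop2 max_order term_dict
  let ordered_term_list := aOrdered term_dict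
  let ordered_term_list := PySem.List.sorted ordered_term_list (fun t => pyStrList t) false
  PySem.List.sorted ordered_term_list (fun t => t.length) false

-- ===== PORT B =====
def bSuffixes (dyson_terms : List (List Int)) : PySem.Set (List Int) :=
  dyson_terms.foldl (fun s term =>
      (PySem.List.pyRange 0 (PySem.List.len term) 1).foldl
        (fun s' i => PySem.Set.add s' (PySem.List.slice term (some i) none)) s) PySem.Set.empty

def get_complete_dyson_like_indices_py_alt (dyson_terms : List (List Int)) : List (List Int) :=
  let ordered_term_list := bSuffixes dyson_terms
  let ordered_term_list := PySem.List.sorted ordered_term_list (fun t => pyStrList t) false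
  PySem.List.sorted ordered_term_list (fun t => t.length) false


-- ===== PRECONDITION & SPEC =====
-- Pre_ excludes exactly the inputs on which A raises: the empty list (ValueError from max())
-- and any input containing an empty term (KeyError from term_dict[0]).
def Pre_get_complete_dyson_like_indices_py (dyson_terms : List (List Int)) : Prop :=
  dyson_terms ≠ [] ∧ [] ∉ dyson_terms
instance (dyson_terms : List (List Int)) : Decidable (Pre_get_complete_dyson_like_indices_py dyson_terms) := by unfold Pre_get_complete_dyson_like_indices_py; infer_instance
def pvWitness_get_complete_dyson_like_indices_py : List (List Int) := [[1, 2], [3]]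

-- On empty input A raises ValueError (max() of an empty sequence) and on input containing an
-- empty term A raises KeyError (term_dict[0]); B returns the sorted suffix set of the remaining terms.
def Raises_get_complete_dyson_like_indices_py (dyson_terms : List (List Int)) : Prop :=
  dyson_terms = [] ∨ [] ∈ dyson_terms
instance (dyson_terms : List (List Int)) : Decidable (Raises_get_complete_dyson_like_indices_py dyson_terms) := by unfold Raises_get_complete_dyson_like_indices_py; infer_instance
def pvRaiseWitness_get_complete_dyson_like_indices_py : List (List Int) := []
def pvRaiseWitnessOut_get_complete_dyson_like_indices_py : List (List Int) := []

def Spec_get_complete_dyson_like_indices_py (dyson_terms : List (List Int)) (out : List (List Int)) : Prop := out = get_complete_dyson_like_indices_py_alt dyson_terms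
instance (dyson_terms : List (List Int)) (out : List (List Int)) : Decidable (Spec_get_complete_dyson_like_indices_py dyson_terms out) := by unfold Spec_get_complete_dyson_like_indices_py; infer_instance

-- ===== CLAIM (what is proved, stated in full; the proofs are below) =====
def Claim_equal_get_complete_dyson_like_indices_py : Prop := ∀ (dyson_terms : List (List Int)), Dom_get_complete_dyson_like_indices_py dyson_terms → Pre_get_complete_dyson_like_indices_py dyson_terms → Spec_get_complete_dyson_like_indices_py dyson_terms (get_complete_dyson_like_indices_py dyson_terms)
def Claim_raises_get_complete_dyson_like_indices_py : Prop := (∀ (dyson_terms : List (List Int)), Dom_get_complete_dyson_like_indices_py dyson_terms → Raises_get_complete_dyson_like_indices_py dyson_terms → ¬ Pre_get_complete_dyson_like_indices_py dyson_terms) ∧ (Dom_get_complete_dyson_like_indices_py (pvRaiseWitness_get_complete_dyson_like_indices_py) ∧ Raises_get_complete_dyson_like_indices_py (pvRaiseWitness_get_complete_dyson_like_indices_py) ∧ get_complete_dyson_like_indices_py_alt (pvRaiseWitness_get_complete_dyson_like_indices_py) = pvRaiseWitnessOut_get_complete_dyson_like_indices_py)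

-- ===== LEMMAS AND PROOFS =====

-- ---- Part 1: str() of an int list is an injective sort key ----

theorem toDigitsCore_append (f n : Nat) (acc : List Char) :
    Nat.toDigitsCore 10 f n acc = Nat.toDigitsCore 10 f n [] ++ acc := by
  induction f generalizing n acc with
  | zero => simp [Nat.toDigitsCore]
  | succ f ih =>
    simp only [Nat.toDigitsCore]
    by_cases h : n / 10 = 0
    · simp [h]
    · simp only [h, if_false]
      rw [ih (n/10) (Nat.digitChar (n % 10) :: acc), ih (n/10) [Nat.digitChar (n % 10)]]
      simp

theorem toDigitsCore_fuel (f f' n : Nat) (acc : List Char) (h : n < f) (h' : n < f') :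
    Nat.toDigitsCore 10 f n acc = Nat.toDigitsCore 10 f' n acc := by
  induction f generalizing f' n acc with
  | zero => omega
  | succ f ih =>
    cases f' with
    | zero => omega
    | succ f' =>
      simp only [Nat.toDigitsCore]
      by_cases h0 : n / 10 = 0
      · simp [h0]
      · simp only [h0, if_false]
        have hn : 0 < n := by
          rcases Nat.eq_zero_or_pos n with rfl | hp
          · simp at h0
          · exact hp
        have hd : n / 10 < n := Nat.div_lt_self hn (by norm_num)
        exact ih f' (n/10) _ (by omega) (by omega)

theorem toDigits_ten_lt (n : Nat) (h : n < 10) : Nat.toDigits 10 n = [Nat.digitChar n] := by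
  have h0 : n / 10 = 0 := Nat.div_eq_of_lt h
  have h1 : n % 10 = n := Nat.mod_eq_of_lt h
  simp [Nat.toDigits, Nat.toDigitsCore, h0, h1]

theorem toDigits_ten_step (n : Nat) (h : 10 ≤ n) :
    Nat.toDigits 10 n = Nat.toDigits 10 (n / 10) ++ [Nat.digitChar (n % 10)] := by
  have h0 : n / 10 ≠ 0 := by
    intro hc; have := Nat.div_eq_of_lt (show n < 10 by omega); omega
  show Nat.toDigitsCore 10 (n+1) n [] = _
  rw [show Nat.toDigitsCore 10 (n+1) n [] = Nat.toDigitsCore 10 n (n/10) [Nat.digitChar (n % 10)] by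
    simp [Nat.toDigitsCore, h0]]
  rw [toDigitsCore_fuel n (n/10 + 1) (n/10) _ (by have := Nat.div_lt_self (by omega : 0 < n) (by norm_num : 1 < 10); omega) (by omega)]
  rw [toDigitsCore_append]
  rfl

theorem digitChar_isDigit (d : Nat) (h : d < 10) : (Nat.digitChar d).isDigit = true := by
  interval_cases d <;> decide

theorem mem_toDigits_isDigit (n : Nat) : ∀ c ∈ Nat.toDigits 10 n, c.isDigit = true := by
  induction n using Nat.strong_induction_on with
  | _ n ih =>
    by_cases h : n < 10
    · rw [toDigits_ten_lt n h]
      intro c hc; simp at hc; subst hc; exact digitChar_isDigit n h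
    · rw [toDigits_ten_step n (by omega)]
      intro c hc
      rcases List.mem_append.1 hc with hc | hc
      · exact ih (n/10) (Nat.div_lt_self (by omega) (by norm_num)) c hc
      · simp at hc; subst hc; exact digitChar_isDigit _ (Nat.mod_lt _ (by norm_num))

theorem toDigits_ne_nil (n : Nat) : Nat.toDigits 10 n ≠ [] := by
  by_cases h : n < 10
  · rw [toDigits_ten_lt n h]; simp
  · rw [toDigits_ten_step n (by omega)]; simp

theorem digitChar_inj (d e : Nat) (hd : d < 10) (he : e < 10) (h : Nat.digitChar d = Nat.digitChar e) : d = e := by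
  have key : ∀ d < 10, ∀ e < 10, Nat.digitChar d = Nat.digitChar e → d = e := by decide
  exact key d hd e he h

theorem toDigits_ten_inj (m : Nat) : ∀ n, Nat.toDigits 10 m = Nat.toDigits 10 n → m = n := by
  induction m using Nat.strong_induction_on with
  | _ m ih =>
    intro n h
    by_cases hm : m < 10 <;> by_cases hn : n < 10
    · rw [toDigits_ten_lt m hm, toDigits_ten_lt n hn] at h
      exact digitChar_inj m n hm hn (by simpa using h)
    · rw [toDigits_ten_lt m hm, toDigits_ten_step n (by omega)] at h
      have hlen := congrArg List.length h
      simp [List.length_append, List.length_eq_zero_iff] at hlen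
      exact absurd hlen (toDigits_ne_nil _)
    · rw [toDigits_ten_step m (by omega), toDigits_ten_lt n hn] at h
      have hlen := congrArg List.length h
      simp [List.length_append, List.length_eq_zero_iff] at hlen
      exact absurd hlen (toDigits_ne_nil _)
    · rw [toDigits_ten_step m (by omega), toDigits_ten_step n (by omega)] at h
      have := List.append_inj' h (by simp)
      have h1 := ih (m/10) (Nat.div_lt_self (by omega) (by norm_num)) (n/10) this.1
      have h2 : m % 10 = n % 10 :=
        digitChar_inj _ _ (Nat.mod_lt _ (by norm_num)) (Nat.mod_lt _ (by norm_num)) (by simpa using this.2)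
      omega

theorem mem_toChars_not_comma (n : Int) : ∀ c ∈ PySem.Int.toChars n, c ≠ ',' := by
  intro c hc
  unfold PySem.Int.toChars at hc
  split at hc
  · rcases List.mem_cons.1 hc with rfl | hc
    · decide
    · have := mem_toDigits_isDigit _ c hc
      intro h; subst h; simp [Char.isDigit] at this
  · have := mem_toDigits_isDigit _ c hc
    intro h; subst h; simp [Char.isDigit] at this

theorem toChars_ne_nil (n : Int) : PySem.Int.toChars n ≠ [] := by
  unfold PySem.Int.toChars
  split
  · simp
  · exact toDigits_ne_nil _

theorem toChars_inj (m n : Int) (h : PySem.Int.toChars m = PySem.Int.toChars n) : m = n := by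
  unfold PySem.Int.toChars at h
  have hhead : ∀ k : Nat, ∀ r, Nat.toDigits 10 k ≠ '-' :: r := by
    intro k r hc
    have : ('-' : Char) ∈ Nat.toDigits 10 k := by rw [hc]; simp
    have := mem_toDigits_isDigit k _ this
    simp [Char.isDigit] at this
  split_ifs at h with h1 h2 h2
  · -- both negative
    have h' := (List.cons.injEq _ _ _ _).mp h
    have := toDigits_ten_inj _ _ h'.2
    omega
  · -- m < 0, 0 ≤ n : head of rhs is a digit, lhs head is '-'
    exact absurd h.symm (hhead _ _)
  · exact absurd h (hhead _ _)
  · -- both nonneg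
    have := toDigits_ten_inj _ _ h
    omega

theorem block_eq (xs : List Char) : ∀ (ys : List Char) (r1 r2 : List Char),
    (∀ c ∈ xs, c ≠ ',') → (∀ c ∈ ys, c ≠ ',') →
    (r1 = [] ∨ ∃ s, r1 = ',' :: s) → (r2 = [] ∨ ∃ s, r2 = ',' :: s) →
    xs ++ r1 = ys ++ r2 → xs = ys ∧ r1 = r2 := by
  induction xs with
  | nil =>
    intro ys r1 r2 _ hys hr1 hr2 h
    cases ys with
    | nil => simpa using h
    | cons y yt =>
      exfalso
      rcases hr1 with rfl | ⟨s, rfl⟩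
      · simp at h
      · simp at h
        exact hys y (by simp) h.1.symm
  | cons x xt ih =>
    intro ys r1 r2 hxs hys hr1 hr2 h
    cases ys with
    | nil =>
      exfalso
      rcases hr2 with rfl | ⟨s, rfl⟩
      · simp at h
      · simp at h
        exact hxs x (by simp) h.1
    | cons y yt =>
      simp only [List.cons_append, List.cons.injEq] at h
      obtain ⟨rfl, h2⟩ := h
      have := ih yt r1 r2 (fun c hc => hxs c (by simp [hc])) (fun c hc => hys c (by simp [hc])) hr1 hr2 h2
      exact ⟨by rw [this.1], this.2⟩

theorem pyReprChars_ne_nil (a : Int) (t : List Int) : pyReprChars (a :: t) ≠ [] := by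
  cases t with
  | nil => simpa [pyReprChars] using toChars_ne_nil a
  | cons c t =>
    simp only [pyReprChars]
    intro hc
    exact toChars_ne_nil a (List.append_eq_nil_iff.mp hc).1

theorem pyReprChars_inj (l1 : List Int) : ∀ l2, pyReprChars l1 = pyReprChars l2 → l1 = l2 := by
  induction l1 with
  | nil =>
    intro l2 h
    cases l2 with
    | nil => rfl
    | cons b t => exact absurd h.symm (pyReprChars_ne_nil b t)
  | cons a t1 ih =>
    intro l2 h
    cases l2 with
    | nil => exact absurd h (pyReprChars_ne_nil a t1)
    | cons b t2 =>
      -- write both sides as block ++ rest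
      have shape : ∀ (c : Int) (t : List Int), pyReprChars (c :: t) = PySem.Int.toChars c ++
          (if t = [] then [] else ',' :: ' ' :: pyReprChars t) := by
        intro c t; cases t <;> simp [pyReprChars]
      rw [shape a t1, shape b t2] at h
      have hb := block_eq _ _ _ _ (mem_toChars_not_comma a) (mem_toChars_not_comma b)
        (by by_cases h1 : t1 = []
            · rw [if_pos h1]; exact Or.inl rfl
            · rw [if_neg h1]; exact Or.inr ⟨_, rfl⟩)
        (by by_cases h1 : t2 = []
            · rw [if_pos h1]; exact Or.inl rfl
            · rw [if_neg h1]; exact Or.inr ⟨_, rfl⟩) h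
      have hab : a = b := toChars_inj _ _ hb.1
      subst hab
      have h2 := hb.2
      rcases Decidable.em (t1 = []) with ht1 | ht1
      · rcases Decidable.em (t2 = []) with ht2 | ht2
        · rw [ht1, ht2]
        · rw [if_pos ht1, if_neg ht2] at h2; simp at h2
      · rcases Decidable.em (t2 = []) with ht2 | ht2
        · rw [if_neg ht1, if_pos ht2] at h2; simp at h2
        · rw [if_neg ht1, if_neg ht2] at h2
          simp only [List.cons.injEq, true_and] at h2
          rw [ih t2 h2]


theorem pyStrList_inj : Function.Injective pyStrList := by
  intro l1 l2 h
  unfold pyStrList at h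
  have h2 := congrArg String.toList h
  simp at h2
  exact pyReprChars_inj l1 l2 h2

-- ---- Part 2: both pre-sort lists hold exactly the nonempty suffixes, without duplicates ----

def SufMem (dt : List (List Int)) (x : List Int) : Prop :=
  ∃ t ∈ dt, ∃ k : Nat, k < t.length ∧ x = t.drop k

-- B side -------------------------------------------------------------------

theorem bSuffixes_inner (t : List Int) (s : PySem.Set (List Int)) :
    (PySem.List.pyRange 0 (PySem.List.len t) 1).foldl
        (fun s' i => PySem.Set.add s' (PySem.List.slice t (some i) none)) s
      = PySem.Set.update s ((PySem.List.pyRange 0 (PySem.List.len t) 1).map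
          (fun i => PySem.List.slice t (some i) none)) := by
  rw [PySem.Set.update_map_eq_foldl_add]

theorem mem_slice_map_range (t x : List Int) :
    (x ∈ (PySem.List.pyRange 0 (PySem.List.len t) 1).map (fun i => PySem.List.slice t (some i) none))
      ↔ ∃ k : Nat, k < t.length ∧ x = t.drop k := by
  simp only [List.mem_map, PySem.List.mem_pyRange_one, PySem.List.len_eq]
  constructor
  · rintro ⟨i, ⟨h0, hi⟩, rfl⟩
    refine ⟨i.toNat, by omega, ?_⟩
    rw [PySem.List.slice_from t h0]
  · rintro ⟨k, hk, rfl⟩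
    refine ⟨(k : Int), ⟨by omega, by omega⟩, ?_⟩
    rw [PySem.List.slice_from t (by omega)]
    simp

theorem bSuffixes_spec (dt : List (List Int)) :
    (bSuffixes dt).Nodup ∧ ∀ x, x ∈ bSuffixes dt ↔ SufMem dt x := by
  have main : ∀ (l : List (List Int)) (s : PySem.Set (List Int)), s.Nodup →
      (l.foldl (fun s term =>
        (PySem.List.pyRange 0 (PySem.List.len term) 1).foldl
          (fun s' i => PySem.Set.add s' (PySem.List.slice term (some i) none)) s) s).Nodup ∧
      ∀ x, x ∈ l.foldl (fun s term =>
        (PySem.List.pyRange 0 (PySem.List.len term) 1).foldl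
          (fun s' i => PySem.Set.add s' (PySem.List.slice term (some i) none)) s) s
        ↔ x ∈ s ∨ SufMem l x := by
    intro l
    induction l with
    | nil => intro s hs; exact ⟨hs, fun x => by simp [SufMem]⟩
    | cons t l ih =>
      intro s hs
      simp only [List.foldl_cons]
      rw [bSuffixes_inner]
      obtain ⟨hnd, hmem⟩ := ih _ (PySem.Set.nodup_update _ _ hs)
      refine ⟨hnd, fun x => ?_⟩
      rw [hmem x, PySem.Set.mem_update, mem_slice_map_range]
      unfold SufMem
      simp only [List.mem_cons]
      constructor
      · rintro ((hx | ⟨k, hk, rfl⟩) | ⟨u, hu, k, hk, rfl⟩)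
        · exact Or.inl hx
        · exact Or.inr ⟨t, Or.inl rfl, k, hk, rfl⟩
        · exact Or.inr ⟨u, Or.inr hu, k, hk, rfl⟩
      · rintro (hx | ⟨u, (rfl | hu), k, hk, rfl⟩)
        · exact Or.inl (Or.inl hx)
        · exact Or.inl (Or.inr ⟨k, hk, rfl⟩)
        · exact Or.inr ⟨u, hu, k, hk, rfl⟩
  have h := main dt PySem.Set.empty (by simp [PySem.Set.empty])
  unfold bSuffixes
  exact ⟨h.1, fun x => by rw [h.2 x]; simp [PySem.Set.empty]⟩

-- A side -------------------------------------------------------------------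

theorem getD_foldl_insert_nil (l : List Int) : ∀ (d : PySem.Dict Int (List (List Int))),
    (∀ k, d.getD k [] = []) → ∀ k, ((l.foldl (fun d k => d.insert k []) d).getD k []) = [] := by
  induction l with
  | nil => intro d h k; exact h k
  | cons a l ih =>
    intro d h k
    simp only [List.foldl_cons]
    refine ih _ (fun k' => ?_) k
    rw [PySem.Dict.getD_insert]
    split <;> simp [h]

theorem getD_aInit (M k : Int) : (aInit M).getD k [] = [] :=
  getD_foldl_insert_nil _ PySem.Dict.empty (by simp [PySem.Dict.getD_empty]) k

theorem keys_aInit (M : Int) : (aInit M).keys = PySem.List.pyRange 1 (M + 1) 1 := by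
  unfold aInit
  rw [show (fun (d : PySem.Dict Int (List (List Int))) (k : Int) => d.insert k ([] : List (List Int)))
      = (fun d k => d.insert k ((fun (_ : PySem.Dict Int (List (List Int))) (_ : Int) => ([] : List (List Int))) d k)) from rfl]
  rw [PySem.Dict.keys_foldl_insert]
  rw [PySem.Dict.keys_empty, PySem.Set.update_nil_left]
  exact PySem.Set.ofList_eq_self_of_nodup _ (PySem.List.nodup_pyRange_one _ _)

theorem loop1_inv (l : List (List Int)) : ∀ (d : PySem.Dict Int (List (List Int))),
    (∀ t ∈ l, (PySem.List.len t) ∈ d.keys) →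
    (∀ k, (d.getD k []).Nodup) →
    (aLoop1 l d).keys = d.keys ∧ (∀ k, ((aLoop1 l d).getD k []).Nodup) ∧
      (∀ k x, x ∈ (aLoop1 l d).getD k [] ↔ x ∈ d.getD k [] ∨ (x ∈ l ∧ (x.length : Int) = k)) := by
  induction l with
  | nil => intro d _ hnd; exact ⟨rfl, hnd, fun k x => by simp [aLoop1]⟩
  | cons t l ih =>
    intro d hk hnd
    have step : aLoop1 (t :: l) d = aLoop1 l
        (if t ∈ d.getD (PySem.List.len t) [] then d
         else d.insert (PySem.List.len t) (d.getD (PySem.List.len t) [] ++ [t])) := by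
      simp only [aLoop1, List.foldl_cons]
    rw [step]
    by_cases hmem : t ∈ d.getD (PySem.List.len t) []
    · rw [if_pos hmem]
      obtain ⟨hkeys, hnd', hmem'⟩ := ih d (fun u hu => hk u (by simp [hu])) hnd
      refine ⟨hkeys, hnd', fun k x => ?_⟩
      rw [hmem' k x]
      constructor
      · rintro (hx | ⟨hx, hlen⟩)
        · exact Or.inl hx
        · exact Or.inr ⟨by simp [hx], hlen⟩
      · rintro (hx | ⟨hx, hlen⟩)
        · exact Or.inl hx
        · rcases List.mem_cons.1 hx with rfl | hx
          · exact Or.inl (by simpa [PySem.List.len_eq, hlen] using hmem)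
          · exact Or.inr ⟨hx, hlen⟩
    · rw [if_neg hmem]
      set L := PySem.List.len t with hL
      set d' := d.insert L (d.getD L [] ++ [t]) with hd'
      have hcont : d.contains L = true := (PySem.Dict.contains_iff_mem_keys d L).2 (hk t (by simp))
      have hkeys' : d'.keys = d.keys := PySem.Dict.keys_insert_of_contains d _ hcont
      have hgetD : ∀ k, d'.getD k [] = if k = L then d.getD L [] ++ [t] else d.getD k [] := by
        intro k; rw [hd', PySem.Dict.getD_insert]
      have hnd2 : ∀ k, (d'.getD k []).Nodup := by
        intro k; rw [hgetD]
        split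
        · simp [List.nodup_append, hnd L]
          exact fun a ha hat => hmem (hat ▸ ha)
        · exact hnd k
      obtain ⟨hkeys'', hnd', hmem'⟩ := ih d' (fun u hu => by rw [hkeys']; exact hk u (by simp [hu])) hnd2
      refine ⟨by rw [hkeys'', hkeys'], hnd', fun k x => ?_⟩
      rw [hmem' k x, hgetD]
      have hlt : (t.length : Int) = L := by simp [hL, PySem.List.len_eq]
      by_cases hkL : k = L
      · subst hkL
        rw [if_pos rfl]
        constructor
        · rintro (hx | ⟨hx, hlen⟩)
          · rcases List.mem_append.1 hx with hx | hx
            · exact Or.inl hx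
            · exact Or.inr ⟨by simp [List.mem_singleton.1 hx], by rw [List.mem_singleton.1 hx]; exact hlt⟩
          · exact Or.inr ⟨List.mem_cons_of_mem _ hx, hlen⟩
        · rintro (hx | ⟨hx, hlen⟩)
          · exact Or.inl (List.mem_append.2 (Or.inl hx))
          · rcases List.mem_cons.1 hx with rfl | hx
            · exact Or.inl (List.mem_append.2 (Or.inr (by simp)))
            · exact Or.inr ⟨hx, hlen⟩
      · rw [if_neg hkL]
        constructor
        · rintro (hx | ⟨hx, hlen⟩)
          · exact Or.inl hx
          · exact Or.inr ⟨List.mem_cons_of_mem _ hx, hlen⟩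
        · rintro (hx | ⟨hx, hlen⟩)
          · exact Or.inl hx
          · rcases List.mem_cons.1 hx with rfl | hx
            · exact (hkL (by rw [← hlen, hlt])).elim
            · exact Or.inr ⟨hx, hlen⟩

def Suf (dt : List (List Int)) (x : List Int) : Prop :=
  ∃ t ∈ dt, x.length ≤ t.length ∧ x = t.drop (t.length - x.length)

def P (dt : List (List Int)) (o k : Int) (x : List Int) : Prop :=
  (x.length : Int) = k ∧ (if o ≤ k then Suf dt x else x ∈ dt)

theorem P_top (dt : List (List Int)) (M k : Int) (x : List Int)
    (hmax : ∀ t ∈ dt, (t.length : Int) ≤ M) :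
    (x ∈ dt ∧ (x.length : Int) = k) ↔ P dt M k x := by
  unfold P
  by_cases hk : M ≤ k
  · rw [if_pos hk]
    constructor
    · rintro ⟨hx, hlen⟩
      exact ⟨hlen, x, hx, le_refl _, by simp⟩
    · rintro ⟨hlen, t, ht, hle, hx⟩
      have h1 : (t.length : Int) ≤ M := hmax t ht
      have h2 : t.length = x.length := by omega
      refine ⟨?_, hlen⟩
      rw [hx, h2]; simpa using ht
  · rw [if_neg hk]
    exact ⟨fun h => ⟨h.2, h.1⟩, fun h => ⟨h.2, h.1⟩⟩

theorem inner_inv (o : Int) (lst : List (List Int)) : ∀ (d : PySem.Dict Int (List (List Int))),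
    ((o - 1) ∈ d.keys) → (∀ k, (d.getD k []).Nodup) →
    (lst.foldl (aStep o) d).keys = d.keys ∧
    (∀ k, ((lst.foldl (aStep o) d).getD k []).Nodup) ∧
    (∀ k x, x ∈ (lst.foldl (aStep o) d).getD k [] ↔
      x ∈ d.getD k [] ∨ (k = o - 1 ∧ ∃ y ∈ lst, x = y.tail)) := by
  induction lst with
  | nil => intro d _ hnd; exact ⟨rfl, hnd, fun k x => by simp⟩
  | cons y lst ih =>
    intro d hkey hnd
    simp only [List.foldl_cons]
    have hstep : aStep o d y = if y.tail ∈ d.getD (o-1) [] then d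
        else d.insert (o-1) (d.getD (o-1) [] ++ [y.tail]) := by
      simp only [aStep, PySem.List.slice_from_one]
    rw [hstep]
    by_cases hmem : y.tail ∈ d.getD (o-1) []
    · rw [if_pos hmem]
      obtain ⟨hkeys, hnd', hmem'⟩ := ih d hkey hnd
      refine ⟨hkeys, hnd', fun k x => ?_⟩
      rw [hmem' k x]
      constructor
      · rintro (hx | ⟨rfl, z, hz, rfl⟩)
        · exact Or.inl hx
        · exact Or.inr ⟨rfl, z, List.mem_cons_of_mem _ hz, rfl⟩
      · rintro (hx | ⟨rfl, z, hz, rfl⟩)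
        · exact Or.inl hx
        · rcases List.mem_cons.1 hz with rfl | hz
          · exact Or.inl hmem
          · exact Or.inr ⟨rfl, z, hz, rfl⟩
    · rw [if_neg hmem]
      set d' := d.insert (o-1) (d.getD (o-1) [] ++ [y.tail]) with hd'
      have hcont : d.contains (o-1) = true := (PySem.Dict.contains_iff_mem_keys d _).2 hkey
      have hkeys' : d'.keys = d.keys := PySem.Dict.keys_insert_of_contains d _ hcont
      have hgetD : ∀ k, d'.getD k [] = if k = o-1 then d.getD (o-1) [] ++ [y.tail] else d.getD k [] := by
        intro k; rw [hd', PySem.Dict.getD_insert]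
      have hnd2 : ∀ k, (d'.getD k []).Nodup := by
        intro k; rw [hgetD]
        split
        · simp [List.nodup_append, hnd (o-1)]
          exact fun a ha hat => hmem (hat ▸ ha)
        · exact hnd k
      obtain ⟨hkeys'', hnd', hmem'⟩ := ih d' (by rw [hkeys']; exact hkey) hnd2
      refine ⟨by rw [hkeys'', hkeys'], hnd', fun k x => ?_⟩
      rw [hmem' k x, hgetD]
      by_cases hkL : k = o - 1
      · subst hkL
        rw [if_pos rfl]
        constructor
        · rintro (hx | ⟨_, z, hz, rfl⟩)
          · rcases List.mem_append.1 hx with hx | hx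
            · exact Or.inl hx
            · exact Or.inr ⟨rfl, y, by simp, List.mem_singleton.1 hx⟩
          · exact Or.inr ⟨rfl, z, List.mem_cons_of_mem _ hz, rfl⟩
        · rintro (hx | ⟨_, z, hz, rfl⟩)
          · exact Or.inl (List.mem_append.2 (Or.inl hx))
          · rcases List.mem_cons.1 hz with rfl | hz
            · exact Or.inl (List.mem_append.2 (Or.inr (by simp)))
            · exact Or.inr ⟨rfl, z, hz, rfl⟩
      · rw [if_neg hkL]
        constructor
        · rintro (hx | ⟨hkk, z, hz, rfl⟩)
          · exact Or.inl hx
          · exact (hkL hkk).elim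
        · rintro (hx | ⟨hkk, z, hz, rfl⟩)
          · exact Or.inl hx
          · exact (hkL hkk).elim

theorem P_step (dt : List (List Int)) (o k : Int) (x : List Int) (h2 : 2 ≤ o) :
    (P dt o k x ∨ (k = o - 1 ∧ ∃ y, P dt o o y ∧ x = y.tail)) ↔ P dt (o-1) k x := by
  unfold P
  by_cases hk : o ≤ k
  · rw [if_pos hk, if_pos (by omega)]
    constructor
    · rintro (h | ⟨hkk, _⟩)
      · exact h
      · omega
    · exact fun h => Or.inl h
  · by_cases hk2 : k = o - 1
    · subst hk2
      rw [if_neg hk]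
      simp only [le_refl, if_true]
      constructor
      · rintro (⟨hlen, hx⟩ | ⟨_, y, ⟨hleny, t, ht, hle, hy⟩, rfl⟩)
        · exact ⟨hlen, x, hx, le_refl _, by simp⟩
        · have hy1 : 1 ≤ y.length := by omega
          have hlt : y.tail.length = y.length - 1 := by simp
          have hyt : y.tail = t.drop (t.length - y.length + 1) := by
            conv_lhs => rw [← List.drop_one, hy]
            rw [List.drop_drop]
          refine ⟨by omega, t, ht, by omega, ?_⟩
          rw [hlt, hyt]
          congr 1
          omega
      · rintro ⟨hlen, t, ht, hle, hx⟩
        by_cases heq : x.length = t.length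
        · left
          refine ⟨hlen, ?_⟩
          rw [hx, heq]; simpa using ht
        · right
          have hlt2 : x.length < t.length := by omega
          have hy0len : (t.drop (t.length - (x.length + 1))).length = x.length + 1 := by
            simp; omega
          refine ⟨trivial, t.drop (t.length - (x.length + 1)), ⟨?_, t, ht, ?_, ?_⟩, ?_⟩
          · rw [hy0len]; push_cast; omega
          · rw [hy0len]; omega
          · congr 1
            rw [hy0len]
          · have htl : (t.drop (t.length - (x.length + 1))).tail
                = t.drop (t.length - (x.length + 1) + 1) := by
              rw [← List.drop_one, List.drop_drop]
            rw [htl]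
            conv_lhs => rw [hx]
            congr 1
            omega
    · rw [if_neg hk, if_neg (by omega)]
      constructor
      · rintro (h | ⟨hkk, _⟩)
        · exact h
        · exact (hk2 hkk).elim
      · exact fun h => Or.inl h

theorem loop2_inv (dt : List (List Int)) (M : Int)
    (hR : ∀ (j : Int), j ∈ PySem.List.pyRange 1 (M+1) 1 ↔ 1 ≤ j ∧ j < M + 1) :
    ∀ (n : Nat) (d : PySem.Dict Int (List (List Int))),
    ((n : Int) + 1 ≤ M) →
    (d.keys = PySem.List.pyRange 1 (M+1) 1) →
    (∀ k, (d.getD k []).Nodup) →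
    (∀ k x, x ∈ d.getD k [] ↔ P dt ((n : Int)+1) k x) →
    (let d' := (PySem.List.pyRange ((n : Int)+1) 1 (-1)).foldl (fun d order =>
        (d.getD order []).foldl (aStep order) d) d
     d'.keys = PySem.List.pyRange 1 (M+1) 1 ∧ (∀ k, (d'.getD k []).Nodup) ∧
       (∀ k x, x ∈ d'.getD k [] ↔ P dt 1 k x)) := by
  intro n
  induction n with
  | zero =>
    intro d _ hkeys hnd hmem
    rw [PySem.List.pyRange_neg_one_eq_nil (by omega)]
    exact ⟨hkeys, hnd, by simpa using hmem⟩
  | succ n ih =>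
    intro d hM hkeys hnd hmem
    push_cast at hM ⊢
    have ho : (1 : Int) < (n : Int) + 1 + 1 := by omega
    rw [PySem.List.pyRange_neg_one_cons ho]
    simp only [List.foldl_cons]
    set o : Int := (n : Int) + 1 + 1 with hodef
    obtain ⟨hkeys', hnd', hmem'⟩ := inner_inv o (d.getD o []) d
      (by rw [hkeys, hR]; omega) hnd
    have hstep : ∀ k x, x ∈ ((d.getD o []).foldl (aStep o) d).getD k [] ↔ P dt (o - 1) k x := by
      intro k x
      rw [hmem' k x, ← P_step dt o k x (by omega)]
      constructor
      · rintro (hx | ⟨hkk, y, hy, rfl⟩)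
        · exact Or.inl ((hmem k x).1 hx)
        · exact Or.inr ⟨hkk, y, (hmem o y).1 hy, rfl⟩
      · rintro (hx | ⟨hkk, y, hy, rfl⟩)
        · exact Or.inl ((hmem k x).2 hx)
        · exact Or.inr ⟨hkk, y, (hmem o y).2 hy, rfl⟩
    have hco : o - 1 = (n : Int) + 1 := by omega
    have := ih ((d.getD o []).foldl (aStep o) d) (by omega)
      (by rw [hkeys', hkeys]) hnd'
      (by intro k x; rw [hstep k x, hco])
    simpa [hco] using this

theorem aOrdered_spec (dt : List (List Int)) (d : PySem.Dict Int (List (List Int))) (M : Int)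
    (hM1 : 1 ≤ M)
    (hkeys : d.keys = PySem.List.pyRange 1 (M+1) 1)
    (hnd : ∀ k, (d.getD k []).Nodup)
    (hmem : ∀ k x, x ∈ d.getD k [] ↔ P dt 1 k x)
    (hmax : ∀ t ∈ dt, (t.length : Int) ≤ M) :
    (aOrdered d).Nodup ∧ ∀ x, x ∈ aOrdered d ↔ SufMem dt x := by
  have hmx : (PySem.List.max? d.keys (fun x => x)).getD 0 = M := by
    rw [hkeys]
    rcases hopt : PySem.List.max? (PySem.List.pyRange 1 (M+1) 1) (fun x => x) with _ | m
    · rw [PySem.List.max?_eq_none_iff] at hopt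
      have : (M : Int) ∈ PySem.List.pyRange 1 (M+1) 1 := (PySem.List.mem_pyRange_one).2 (by omega)
      rw [hopt] at this; simp at this
    · have h1 := PySem.List.max?_mem hopt
      have h2 := PySem.List.max?_isMax hopt M ((PySem.List.mem_pyRange_one).2 (by omega))
      rw [PySem.List.mem_pyRange_one] at h1
      simp only [Option.getD_some]
      omega
  have hord : aOrdered d = (PySem.List.pyRange 1 (M+1) 1).flatMap (fun k => d.getD k []) := by
    unfold aOrdered
    rw [hmx, PySem.List.foldl_append_eq_flatMap]
    simp
  constructor
  · rw [hord]
    rw [List.nodup_flatMap]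
    refine ⟨fun k _ => hnd k, ?_⟩
    have hpw := PySem.List.pairwise_lt_pyRange_one 1 (M+1)
    refine hpw.imp ?_
    intro a b hab x hx1 hx2
    have h1 := ((hmem a x).1 hx1).1
    have h2 := ((hmem b x).1 hx2).1
    omega
  · intro x
    rw [hord, List.mem_flatMap]
    constructor
    · rintro ⟨k, hk, hx⟩
      obtain ⟨hlen, hsuf⟩ := (hmem k x).1 hx
      rw [PySem.List.mem_pyRange_one] at hk
      rw [if_pos (by omega)] at hsuf
      obtain ⟨t, ht, hle, hxd⟩ := hsuf
      exact ⟨t, ht, t.length - x.length, by omega, hxd⟩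
    · rintro ⟨t, ht, j, hj, rfl⟩
      have hlen : (t.drop j).length = t.length - j := by simp
      refine ⟨((t.drop j).length : Int), PySem.List.mem_pyRange_one.2 ⟨by omega, ?_⟩, ?_⟩
      · have := hmax t ht
        omega
      · rw [hmem]
        refine ⟨rfl, ?_⟩
        rw [if_pos (by omega)]
        refine ⟨t, ht, by omega, ?_⟩
        congr 1
        omega

theorem equiv_main (dt : List (List Int)) (hne : dt ≠ []) (hnil : [] ∉ dt) :
    get_complete_dyson_like_indices_py dt = get_complete_dyson_like_indices_py_alt dt := by
  -- max order facts
  rcases hopt : PySem.List.max? (dt.map (fun t => PySem.List.len t)) (fun x => x) with _ | M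
  · rw [PySem.List.max?_eq_none_iff] at hopt
    simp at hopt
    exact absurd hopt hne
  · have hmaxeq : aMaxOrder dt = M := by unfold aMaxOrder; rw [hopt]; rfl
    have hmax : ∀ t ∈ dt, (t.length : Int) ≤ M := by
      intro t ht
      have := PySem.List.max?_isMax hopt (PySem.List.len t)
        (List.mem_map.2 ⟨t, ht, rfl⟩)
      simpa [PySem.List.len_eq] using this
    have hlen1 : ∀ t ∈ dt, 1 ≤ t.length := by
      intro t ht
      cases t with
      | nil => exact absurd ht hnil
      | cons a b => simp
    have hM1 : 1 ≤ M := by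
      have h1 := PySem.List.max?_mem hopt
      obtain ⟨t, ht, hte⟩ := List.mem_map.1 h1
      have := hlen1 t ht
      rw [PySem.List.len_eq] at hte
      omega
    -- loop1
    obtain ⟨hkeys1, hnd1, hmem1⟩ := loop1_inv dt (aInit M)
      (by
        intro t ht
        rw [keys_aInit, PySem.List.mem_pyRange_one, PySem.List.len_eq]
        have := hlen1 t ht
        have := hmax t ht
        omega)
      (fun k => by rw [getD_aInit]; exact List.nodup_nil)
    have hmem1' : ∀ k x, x ∈ (aLoop1 dt (aInit M)).getD k [] ↔ P dt M k x := by
      intro k x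
      rw [hmem1 k x, getD_aInit]
      simp only [List.not_mem_nil, false_or]
      exact P_top dt M k x hmax
    -- loop2
    have hn : ((M - 1).toNat : Int) + 1 = M := by omega
    have hloop2 := loop2_inv dt M (fun j => PySem.List.mem_pyRange_one) (M-1).toNat
      (aLoop1 dt (aInit M)) (by omega)
      (by rw [hkeys1, keys_aInit]) hnd1
      (by intro k x; rw [hmem1' k x, hn])
    rw [hn] at hloop2
    obtain ⟨hkeys2, hnd2, hmem2⟩ := hloop2
    have hA := aOrdered_spec dt _ M hM1 hkeys2 hnd2 hmem2 hmax
    have hB := bSuffixes_spec dt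
    -- same set of elements
    have hperm : (aOrdered (aLoop2 M (aLoop1 dt (aInit M)))).Perm (bSuffixes dt) := by
      refine (List.perm_ext_iff_of_nodup hA.1 hB.1).2 ?_
      intro x
      rw [hA.2 x, hB.2 x]
    have hs := PySem.List.sorted_eq_sorted_of_perm _ _ (fun t => pyStrList t) pyStrList_inj hperm
    have hgoalA : get_complete_dyson_like_indices_py dt
        = PySem.List.sorted (PySem.List.sorted
            (aOrdered (aLoop2 (aMaxOrder dt) (aLoop1 dt (aInit (aMaxOrder dt)))))
            (fun t => pyStrList t)) (fun t => t.length) := rfl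
    have hgoalB : get_complete_dyson_like_indices_py_alt dt
        = PySem.List.sorted (PySem.List.sorted (bSuffixes dt)
            (fun t => pyStrList t)) (fun t => t.length) := rfl
    rw [hgoalA, hgoalB, hmaxeq, hs]

-- ===== VERDICT (by name: the statement is the Claim_ definition above) =====
theorem get_complete_dyson_like_indices_py_spec : Claim_equal_get_complete_dyson_like_indices_py := by
  intro dyson_terms _ hpre
  unfold Spec_get_complete_dyson_like_indices_py
  exact equiv_main dyson_terms hpre.1 hpre.2

@[simp]
theorem get_complete_dyson_like_indices_py_raises : Claim_raises_get_complete_dyson_like_indices_py := by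
  unfold Claim_raises_get_complete_dyson_like_indices_py
  exact ⟨by intro dt _ hr hp; rcases hr with h | h <;> simp [Pre_get_complete_dyson_like_indices_py, h] at hp, by decide⟩
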